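-- pv_equiv track=rewrite | github.com/alexandre-lavoie/line_em_up | line_em_up/common/utils.py | make_line
-- ===== SOURCE A (Python) =====
-- from typing import Tuple, Union, List
--
-- def make_line(point: Tuple[int, int], direction: Tuple[int, int], length: int, board_size: int) -> Union[List[Tuple[int, int]], None]:
--     points = []
--
--     for _ in range(length):
--         for v in point:
--             if v < 0 or v >= board_size:
--                 return None
--
--         points.append(point)
--         point = tuple([p + d for p, d in zip(point, direction)])
--
--     return points
-- ===== SOURCE B (Python) =====
-- def make_line(point, direction, length, board_size):
--     out_of_bounds = any(
--         p + i * d < 0 or p + i * d >= board_size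
--         for i in range(length) for p, d in zip(point, direction))
--     if out_of_bounds:
--         return None
--     return [tuple(p + i * d for p, d in zip(point, direction)) for i in range(length)]
-- ===== Notes on version B (the rewrite author's own statement) =====
-- stated objective: alternative
-- what changed: Replaces A's interleaved check-append-advance loop over a mutated point with a validate-then-generate two-pass structure: a short-circuiting any() over the closed-form points point + i*direction, then a list comprehension building them.
import Mathlib
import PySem

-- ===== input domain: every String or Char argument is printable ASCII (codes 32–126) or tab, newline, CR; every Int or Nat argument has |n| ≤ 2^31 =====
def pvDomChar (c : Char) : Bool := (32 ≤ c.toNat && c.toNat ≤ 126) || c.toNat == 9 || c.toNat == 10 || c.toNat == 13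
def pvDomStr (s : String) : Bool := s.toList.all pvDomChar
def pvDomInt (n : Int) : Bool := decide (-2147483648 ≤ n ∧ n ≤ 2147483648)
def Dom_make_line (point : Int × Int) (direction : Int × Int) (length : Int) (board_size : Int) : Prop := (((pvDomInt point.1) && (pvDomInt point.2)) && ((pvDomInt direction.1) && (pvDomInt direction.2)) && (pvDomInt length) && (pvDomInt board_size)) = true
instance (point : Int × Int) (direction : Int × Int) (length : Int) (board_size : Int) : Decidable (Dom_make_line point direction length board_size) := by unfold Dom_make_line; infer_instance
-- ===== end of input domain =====

-- ===== PORT A =====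
-- A's loop: check both coordinates of the current point, append it, advance by direction.
def mlGoA (dx dy bs : Int) : Nat → Int × Int → List (Int × Int) → Option (List (Int × Int))
  | 0, _, acc => some acc
  | n+1, (x, y), acc =>
      if x < 0 ∨ bs ≤ x ∨ y < 0 ∨ bs ≤ y then none
      else mlGoA dx dy bs n (x + dx, y + dy) (acc ++ [(x, y)])

def make_line (point : Int × Int) (direction : Int × Int) (length : Int) (board_size : Int) : Option (List (Int × Int)) :=
  mlGoA direction.1 direction.2 board_size length.toNat point []

-- ===== PORT B =====
-- B: validate-then-generate — a short-circuiting any() over the closed-form points point + i*direction, then a map building them.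
-- B's short-circuiting `any(...)` over the index generator, ported as lazy Bool `||` recursion
def mlAnyOOB (px py dx dy bs : Int) : Nat → Nat → Bool
  | 0, _ => false
  | fuel+1, i =>
      (decide (px + (i : Int) * dx < 0) || decide (bs ≤ px + (i : Int) * dx) ||
       decide (py + (i : Int) * dy < 0) || decide (bs ≤ py + (i : Int) * dy)) ||
      mlAnyOOB px py dx dy bs fuel (i + 1)

def make_line_alt (point : Int × Int) (direction : Int × Int) (length : Int) (board_size : Int) : Option (List (Int × Int)) :=
  if mlAnyOOB point.1 point.2 direction.1 direction.2 board_size length.toNat 0 then none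
  else some ((List.range length.toNat).map
    (fun i : Nat => (point.1 + (i : Int) * direction.1, point.2 + (i : Int) * direction.2)))

-- ===== PRECONDITION & SPEC =====
def Spec_make_line (point : Int × Int) (direction : Int × Int) (length : Int) (board_size : Int) (out : Option (List (Int × Int))) : Prop := out = make_line_alt point direction length board_size
instance (point : Int × Int) (direction : Int × Int) (length : Int) (board_size : Int) (out : Option (List (Int × Int))) : Decidable (Spec_make_line point direction length board_size out) := by unfold Spec_make_line; infer_instance

-- ===== CLAIM (what is proved, stated in full; the proofs are below) =====
def Claim_equal_make_line : Prop := ∀ (point : Int × Int) (direction : Int × Int) (length : Int) (board_size : Int), Dom_make_line point direction length board_size → Spec_make_line point direction length board_size (make_line point direction length board_size)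

-- ===== LEMMAS AND PROOFS =====

-- ===== VERDICT (by name: the statement is the Claim_ definition above) =====

theorem mlGoA_eq (dx dy bs : Int) : ∀ (n : Nat) (px py : Int) (acc : List (Int × Int)),
    mlGoA dx dy bs n (px, py) acc =
      (if ((List.range n).map (fun i : Nat => (px + (i : Int) * dx, py + (i : Int) * dy))).any
            (fun pt => decide (pt.1 < 0) || decide (bs ≤ pt.1) || decide (pt.2 < 0) || decide (bs ≤ pt.2))
       then none
       else some (acc ++ (List.range n).map (fun i : Nat => (px + (i : Int) * dx, py + (i : Int) * dy)))) := by
  intro n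
  induction n with
  | zero => intro px py acc; simp [mlGoA]
  | succ n ih =>
      intro px py acc
      rw [List.range_succ_eq_map]
      have hm : ∀ px' py' : Int,
          List.map (fun i : Nat => (px' + (i : Int) * dx, py' + (i : Int) * dy)) (List.map Nat.succ (List.range n)) =
          List.map (fun i : Nat => (px' + dx + (i : Int) * dx, py' + dy + (i : Int) * dy)) (List.range n) := by
        intro px' py'
        rw [List.map_map]
        apply List.map_congr_left
        intro i _
        simp only [Function.comp, Nat.succ_eq_add_one, Nat.cast_add, Nat.cast_one, Prod.mk.injEq]
        constructor <;> ring
      by_cases h : px < 0 ∨ bs ≤ px ∨ py < 0 ∨ bs ≤ py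
      · simp only [mlGoA, if_pos h, List.map_cons, List.any_cons, Nat.cast_zero, zero_mul, add_zero]
        rcases h with h | h | h | h <;> simp [h]
      · simp only [mlGoA, if_neg h]
        rw [ih (px + dx) (py + dy) (acc ++ [(px, py)])]
        rw [not_or, not_or, not_or, not_lt, not_le, not_lt, not_le] at h
        obtain ⟨h1, h2, h3, h4⟩ := h
        simp only [List.map_cons, List.any_cons, Nat.cast_zero, zero_mul, add_zero, hm]
        have hb : (decide (px < 0) || decide (bs ≤ px) || decide (py < 0) || decide (bs ≤ py)) = false := by
          rw [decide_eq_false (by omega : ¬ px < 0), decide_eq_false (by omega : ¬ bs ≤ px),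
            decide_eq_false (by omega : ¬ py < 0), decide_eq_false (by omega : ¬ bs ≤ py)]
          rfl
        simp only [hb, Bool.false_or]
        split <;> simp

theorem mlAnyOOB_eq (px py dx dy bs : Int) : ∀ (n i : Nat),
    mlAnyOOB px py dx dy bs n i =
      (List.range n).any (fun j : Nat =>
        decide (px + ((i + j : Nat) : Int) * dx < 0) || decide (bs ≤ px + ((i + j : Nat) : Int) * dx) ||
        decide (py + ((i + j : Nat) : Int) * dy < 0) || decide (bs ≤ py + ((i + j : Nat) : Int) * dy)) := by
  intro n
  induction n with
  | zero => intro i; simp [mlAnyOOB]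
  | succ n ih =>
      intro i
      rw [List.range_succ_eq_map]
      simp only [mlAnyOOB, ih (i + 1), List.any_cons, List.any_map, Function.comp_def,
        Nat.succ_eq_add_one, Nat.add_zero]
      congr 2
      funext j
      have : i + 1 + j = i + (j + 1) := by omega
      rw [this]

theorem make_line_spec : Claim_equal_make_line := by
  intro point direction length board_size _
  unfold Spec_make_line make_line make_line_alt
  obtain ⟨px, py⟩ := point
  rw [mlGoA_eq, List.any_map, mlAnyOOB_eq]
  simp only [Function.comp_def, Nat.zero_add, List.nil_append]
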